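-- pv_equiv track=rewrite | github.com/bryankazaka/CS6140_Final_Project | enhanced_clustering.py | _extract_common_features
-- ===== SOURCE A (Python) =====
-- from collections import defaultdict
--
-- def _extract_common_features(paths):
--     """
--     For a list of paths (each path = [(feat,val), (feat,val), ...]),
--     find features that appear in at least half the paths, collecting all their encountered values.
--     """
--     feature_counts = defaultdict(int)
--     feature_values = defaultdict(set)
--     total = len(paths)
--
--     for path in paths:
--         used_feats = set()
--         for (f, v) in path:
--             if f not in used_feats:
--                 feature_counts[f] += 1
--                 used_feats.add(f)
--             feature_values[f].add(v)
--
--     common = {}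
--     for f, ct in feature_counts.items():
--         if ct >= total/2:
--             common[f] = feature_values[f]
--     return common
-- ===== SOURCE B (Python) =====
-- from collections import Counter
--
-- def _extract_common_features(paths):
--     """
--     For a list of paths (each path = [(feat,val), (feat,val), ...]),
--     find features that appear in at least half the paths, collecting all their encountered values.
--     """
--     total = len(paths)
--     # pass 1: count, per feature, the paths mentioning it (dict(path) dedups within a path)
--     counts = Counter(f for path in paths for f in dict(path))
--     common_feats = [f for f, c in counts.items() if 2 * c >= total]
--     # pass 2: collect the values only for the selected features
--     return {f: {v for path in paths for (g, v) in path if g == f}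
--             for f in common_feats}
-- ===== Notes on version B (the rewrite author's own statement) =====
-- stated objective: alternative
-- what changed: B is two staged passes instead of A's single fused loop with mutable count/value dicts and a per-path 'used_feats' membership branch: pass 1 counts with Counter over per-path deduplicated features (dict(path)), selects the common features, and pass 2 rescans the paths building each selected feature's value set by a comprehension.
import Mathlib
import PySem

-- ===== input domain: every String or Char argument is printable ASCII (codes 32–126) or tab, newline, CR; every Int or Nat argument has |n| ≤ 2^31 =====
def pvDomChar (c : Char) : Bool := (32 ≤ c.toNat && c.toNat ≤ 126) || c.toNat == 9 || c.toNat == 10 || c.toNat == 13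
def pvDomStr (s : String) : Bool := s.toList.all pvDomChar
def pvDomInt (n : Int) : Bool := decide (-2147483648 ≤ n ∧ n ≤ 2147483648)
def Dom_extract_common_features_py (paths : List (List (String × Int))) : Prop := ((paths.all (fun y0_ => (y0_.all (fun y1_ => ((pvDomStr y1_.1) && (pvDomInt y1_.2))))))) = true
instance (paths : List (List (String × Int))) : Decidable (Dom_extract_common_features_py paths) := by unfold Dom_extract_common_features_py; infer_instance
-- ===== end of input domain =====

-- B replaces A's single fused loop (count dict + value dict + per-path 'used_feats' branch) by two
-- staged passes: a Counter over per-path deduplicated features selects the common features, then a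
-- rescan builds each selected feature's value set (objective: alternative).


-- ===== PORT A =====
-- inner loop body: 'for (f, v) in path: if f not in used_feats: counts[f] += 1; used.add f; values[f].add(v)'
def pvInnerA (st : PySem.Dict String Int × PySem.Dict String (PySem.Set Int) × PySem.Set String)
    (fv : String × Int) :
    PySem.Dict String Int × PySem.Dict String (PySem.Set Int) × PySem.Set String :=
  let cu : PySem.Dict String Int × PySem.Set String :=
    if PySem.Set.contains st.2.2 fv.1 then (st.1, st.2.2)
    else (st.1.modify fv.1 0 (· + 1), PySem.Set.add st.2.2 fv.1)
  (cu.1, st.2.1.modify fv.1 PySem.Set.empty (fun s => PySem.Set.add s fv.2), cu.2)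

-- outer loop body: fresh 'used_feats = set()' per path
def pvOuterA (st : PySem.Dict String Int × PySem.Dict String (PySem.Set Int))
    (path : List (String × Int)) :
    PySem.Dict String Int × PySem.Dict String (PySem.Set Int) :=
  let r := path.foldl pvInnerA (st.1, st.2, PySem.Set.empty)
  (r.1, r.2.1)

-- 'ct >= total/2' on ints is exactly '2*ct >= total' (Python's float division of ints ≤ 2^31 is exact here)
def extract_common_features_py (paths : List (List (String × Int))) : List (String × List Int) :=
  let total : Int := paths.length
  let st := paths.foldl pvOuterA (PySem.Dict.empty, PySem.Dict.empty)
  let common : PySem.Dict String (PySem.Set Int) :=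
    st.1.items.foldl
      (fun c p => if 2 * p.2 ≥ total then c.insert p.1 (st.2.getD p.1 PySem.Set.empty) else c)
      PySem.Dict.empty
  common.items

-- ===== PORT B =====
-- 'dict(path)' used only for its keys: the path's distinct features, first-occurrence order
def pvDistinctFeats (path : List (String × Int)) : List String :=
  (path.foldl (fun d p => d.insert p.1 p.2) PySem.Dict.empty).keys

-- 'c >= total/2' on ints is written as '2*c >= total' in Source B (integer-exact)
def extract_common_features_py_alt (paths : List (List (String × Int))) : List (String × List Int) :=
  let total : Int := paths.length
  let counts := PySem.Dict.counter (paths.flatMap pvDistinctFeats)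
  let commonFeats := (counts.items.filter (fun p => decide (2 * p.2 ≥ total))).map (·.1)
  commonFeats.map (fun f =>
    (f, PySem.Set.ofList ((paths.flatMap (fun path => path.filter (fun p => p.1 == f))).map (·.2))))

-- ===== PRECONDITION & SPEC =====
def Spec_extract_common_features_py (paths : List (List (String × Int))) (out : List (String × List Int)) : Prop := out = extract_common_features_py_alt paths
instance (paths : List (List (String × Int))) (out : List (String × List Int)) : Decidable (Spec_extract_common_features_py paths out) := by unfold Spec_extract_common_features_py; infer_instance

-- ===== CLAIM (what is proved, stated in full; the proofs are below) =====
def Claim_equal_extract_common_features_py : Prop := ∀ (paths : List (List (String × Int))), Dom_extract_common_features_py paths → Spec_extract_common_features_py paths (extract_common_features_py paths)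

-- ===== LEMMAS AND PROOFS =====

theorem pvSet_contains_add {α : Type} [BEq α] [LawfulBEq α] (u : PySem.Set α) (g f : α) :
    PySem.Set.contains (PySem.Set.add u g) f = (PySem.Set.contains u f || f == g) := by
  simp only [PySem.Set.contains, PySem.Set.add]
  split_ifs with h <;> by_cases hfg : f = g <;> simp_all

-- counts after one path: +1 exactly for features of the path not already in used
theorem pvInnerA_counts (path : List (String × Int))
    (c : PySem.Dict String Int) (v : PySem.Dict String (PySem.Set Int)) (u : PySem.Set String)
    (f : String) :
    ((path.foldl pvInnerA (c, v, u)).1).getD f 0 =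
      c.getD f 0 + (if path.any (fun p => p.1 == f) ∧ PySem.Set.contains u f = false then 1 else 0) := by
  induction path generalizing c v u with
  | nil => simp
  | cons hd tl ih =>
    simp only [List.foldl_cons, pvInnerA]
    by_cases hu : PySem.Set.contains u hd.1 = true
    · rw [if_pos hu, ih]
      by_cases hf : f = hd.1
      · subst hf; simp_all [PySem.Set.contains]
      · have h1 : (hd.1 == f) = false := by simp [Ne.symm hf]
        simp only [List.any_cons, h1, Bool.false_or]
    · rw [if_neg hu, ih]
      rw [Bool.not_eq_true] at hu
      by_cases hf : f = hd.1
      · subst hf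
        rw [PySem.Dict.getD_modify_self, pvSet_contains_add]
        simp_all [PySem.Set.contains, List.any_cons]
      · rw [PySem.Dict.getD_modify_of_ne _ _ _ hf, pvSet_contains_add]
        have h1 : (hd.1 == f) = false := by simp [Ne.symm hf]
        have h2 : (f == hd.1) = false := by simp [hf]
        simp only [List.any_cons, h1, h2, Bool.false_or, Bool.or_false]

-- values after one path: the values carried by f in the path, added in order
theorem pvInnerA_values (path : List (String × Int))
    (c : PySem.Dict String Int) (v : PySem.Dict String (PySem.Set Int)) (u : PySem.Set String)
    (f : String) :
    ((path.foldl pvInnerA (c, v, u)).2.1).getD f PySem.Set.empty =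
      PySem.Set.update (v.getD f PySem.Set.empty)
        ((path.filter (fun p => p.1 == f)).map (·.2)) := by
  induction path generalizing c v u with
  | nil => simp [PySem.Set.update]
  | cons hd tl ih =>
    simp only [List.foldl_cons, pvInnerA]
    rw [ih]
    by_cases hf : f = hd.1
    · subst hf
      rw [PySem.Dict.getD_modify_self]
      simp [PySem.Set.update]
    · rw [PySem.Dict.getD_modify_of_ne _ _ _ hf]
      have h1 : (hd.1 == f) = false := by simp [Ne.symm hf]
      simp [h1]

-- keys of counts after one path
theorem pvInnerA_keys (path : List (String × Int))
    (c : PySem.Dict String Int) (v : PySem.Dict String (PySem.Set Int)) (u : PySem.Set String)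
    (h : ∀ f, PySem.Set.contains u f = true → c.contains f = true) :
    ((path.foldl pvInnerA (c, v, u)).1).keys =
      PySem.Set.update c.keys (path.map (·.1)) := by
  induction path generalizing c v u with
  | nil => simp [PySem.Set.update]
  | cons hd tl ih =>
    simp only [List.foldl_cons, pvInnerA]
    by_cases hu : PySem.Set.contains u hd.1 = true
    · rw [if_pos hu, ih _ _ _ h]
      have hc : c.contains hd.1 = true := h _ hu
      have hadd : PySem.Set.add c.keys hd.1 = c.keys := by
        simp [PySem.Set.add, (PySem.Dict.contains_iff_mem_keys c hd.1).mp hc]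
      simp [PySem.Set.update, hadd]
    · rw [if_neg hu]
      rw [Bool.not_eq_true] at hu
      have h' : ∀ g, PySem.Set.contains (PySem.Set.add u hd.1) g = true →
          (c.modify hd.1 0 (· + 1)).contains g = true := by
        intro g hg
        rw [pvSet_contains_add] at hg
        rw [PySem.Dict.contains_modify]
        rcases Bool.or_eq_true_iff.mp hg with h1 | h1
        · exact Bool.or_eq_true_iff.mpr (Or.inr (h _ h1))
        · exact Bool.or_eq_true_iff.mpr (Or.inl h1)
      rw [ih _ _ _ h']
      have hk : (c.modify hd.1 0 (· + 1)).keys = PySem.Set.add c.keys hd.1 := by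
        rw [PySem.Dict.keys_modify]
        by_cases hc : c.contains hd.1 = true
        · rw [PySem.Dict.keys_insert_of_contains _ _ hc]
          simp [PySem.Set.add, (PySem.Dict.contains_iff_mem_keys c hd.1).mp hc]
        · rw [Bool.not_eq_true] at hc
          rw [PySem.Dict.keys_insert_of_not_contains _ _ hc]
          have hm : ¬ hd.1 ∈ c.keys := fun hm => by
            simp [(PySem.Dict.contains_iff_mem_keys c hd.1).mpr hm] at hc
          simp [PySem.Set.add, hm]
      rw [hk]
      simp [PySem.Set.update]

-- outer-loop invariant for A
theorem pvOuterA_inv (paths : List (List (String × Int)))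
    (c : PySem.Dict String Int) (v : PySem.Dict String (PySem.Set Int)) :
    (paths.foldl pvOuterA (c, v)).1.keys
        = PySem.Set.update c.keys (paths.flatMap (fun path => path.map (·.1)))
    ∧ (∀ f, (paths.foldl pvOuterA (c, v)).1.getD f 0
        = c.getD f 0 + (paths.countP (fun path => path.any (fun p => p.1 == f)) : Int))
    ∧ (∀ f, (paths.foldl pvOuterA (c, v)).2.getD f PySem.Set.empty
        = PySem.Set.update (v.getD f PySem.Set.empty)
            ((paths.flatMap (fun path => path.filter (fun p => p.1 == f))).map (·.2))) := by
  induction paths generalizing c v with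
  | nil => simp [PySem.Set.update]
  | cons hd tl ih =>
    simp only [List.foldl_cons, pvOuterA]
    have hempty : ∀ g : String, PySem.Set.contains PySem.Set.empty g = true → c.contains g = true := by
      intro g hg; simp [PySem.Set.empty, PySem.Set.contains] at hg
    refine ⟨?_, fun f => ?_, fun f => ?_⟩
    · rw [(ih _ _).1, pvInnerA_keys _ _ _ _ hempty]
      simp [PySem.Set.update, List.foldl_append]
    · rw [(ih _ _).2.1 f, pvInnerA_counts]
      simp only [PySem.Set.contains, PySem.Set.empty, List.contains_nil, List.countP_cons]
      push_cast
      by_cases h : (hd.any fun p => p.1 == f) = true <;> (simp [h]; try ring)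
    · rw [(ih _ _).2.2 f, pvInnerA_values]
      simp [PySem.Set.update, List.foldl_append]

-- s.update(set(xs)) = s.update(xs)
theorem pvSet_update_ofList {α : Type} [BEq α] [LawfulBEq α] (s : PySem.Set α) (xs : List α) :
    PySem.Set.update s (PySem.Set.ofList xs) = PySem.Set.update s xs := by
  rw [PySem.Set.update_eq_append_filter, PySem.Set.update_eq_append_filter,
    PySem.Set.ofList_ofList]

-- deduplicating inside each chunk does not change the overall set
theorem pvOfList_flatMap_ofList {α β : Type} [BEq β] [LawfulBEq β]
    (l : List α) (g : α → List β) (s : PySem.Set β) :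
    PySem.Set.update s (l.flatMap (fun x => PySem.Set.ofList (g x)))
      = PySem.Set.update s (l.flatMap g) := by
  induction l generalizing s with
  | nil => rfl
  | cons x t ih =>
    rw [List.flatMap_cons, List.flatMap_cons, PySem.Set.update_append,
      PySem.Set.update_append, pvSet_update_ofList, ih]

-- the distinct features of a path, in first-occurrence order
theorem pvDistinctFeats_eq (path : List (String × Int)) :
    pvDistinctFeats path = PySem.Set.ofList (path.map (·.1)) := by
  unfold pvDistinctFeats
  rw [PySem.Dict.keys_foldl_insert_key path (·.1) (fun _ p => p.2) PySem.Dict.empty,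
    PySem.Dict.keys_empty, PySem.Set.update_nil_left]

-- occurrences of f in the flattened distinct-feature lists = number of paths mentioning f
theorem pvCount_flatMap_distinct (paths : List (List (String × Int))) (f : String) :
    (paths.flatMap pvDistinctFeats).count f
      = paths.countP (fun path => path.any (fun p => p.1 == f)) := by
  induction paths with
  | nil => rfl
  | cons hd tl ih =>
    rw [List.flatMap_cons, List.count_append, List.countP_cons, ih, pvDistinctFeats_eq]
    have hmem : f ∈ hd.map (·.1) ↔ (hd.any fun p => p.1 == f) = true := by
      simp only [List.mem_map, List.any_eq_true, beq_iff_eq]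
    by_cases h : (hd.any fun p => p.1 == f) = true
    · have hm : f ∈ PySem.Set.ofList (hd.map (·.1)) :=
        (PySem.Set.mem_ofList _ _).mpr (hmem.mpr h)
      rw [List.count_eq_one_of_mem (PySem.Set.nodup_ofList _) hm]
      simp [h, Nat.add_comm]
    · have hm : f ∉ PySem.Set.ofList (hd.map (·.1)) := fun hm =>
        h (hmem.mp ((PySem.Set.mem_ofList _ _).mp hm))
      rw [List.count_eq_zero_of_not_mem hm]
      simp [h]

-- ===== VERDICT (by name: the statement is the Claim_ definition above) =====
theorem extract_common_features_py_spec : Claim_equal_extract_common_features_py := by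
  unfold Claim_equal_extract_common_features_py
  intro paths _
  unfold Spec_extract_common_features_py
  dsimp only [extract_common_features_py, extract_common_features_py_alt]
  obtain ⟨hk, hc, hv⟩ := pvOuterA_inv paths PySem.Dict.empty PySem.Dict.empty
  set st := paths.foldl pvOuterA (PySem.Dict.empty, PySem.Dict.empty) with hst
  -- A-side characterisation
  have hkeys : st.1.keys = PySem.Set.ofList (paths.flatMap (fun path => path.map (·.1))) := by
    rw [hk, PySem.Dict.keys_empty]; rfl
  have hnd : st.1.keys.Nodup := by rw [hkeys]; exact PySem.Set.nodup_ofList _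
  have hcnt : ∀ f, st.1.getD f 0 = (paths.countP (fun path => path.any (fun p => p.1 == f)) : Int) := by
    intro f; rw [hc f, PySem.Dict.getD_empty, zero_add]
  have hval : ∀ f, st.2.getD f PySem.Set.empty =
      PySem.Set.ofList ((paths.flatMap (fun path => path.filter (fun p => p.1 == f))).map (·.2)) := by
    intro f; rw [hv f, PySem.Dict.getD_empty]; rfl
  -- reduce A's result
  rw [PySem.Dict.items_eq_map_keys st.1 hnd 0]
  rw [PySem.List.foldl_ite_eq_foldl_filter
        (p := fun p : String × Int => 2 * p.2 ≥ (paths.length : Int))]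
  rw [List.filter_map, List.foldl_map]
  have hfilt : st.1.keys.filter
        ((fun x : String × Int => decide (2 * x.2 ≥ (paths.length : Int))) ∘
          (fun k => (k, st.1.getD k 0)))
      = st.1.keys.filter (fun f =>
          decide (2 * ((paths.countP (fun path => path.any (fun p => p.1 == f)) : Int)) ≥ (paths.length : Int))) := by
    apply List.filter_congr
    intro k _
    simp only [Function.comp_apply, hcnt k]
  rw [hfilt]
  have hndf : (st.1.keys.filter (fun f =>
      decide (2 * ((paths.countP (fun path => path.any (fun p => p.1 == f)) : Int)) ≥ (paths.length : Int)))).Nodup :=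
    List.Nodup.filter _ hnd
  rw [PySem.Dict.items_foldl_insert_fresh _ (fun a => (a, st.1.getD a 0).1)
        (fun a => st.2.getD (a, st.1.getD a 0).1 PySem.Set.empty) PySem.Dict.empty
        (fun a _ => PySem.Dict.contains_empty _)
        (by simpa using hndf)]
  simp only [PySem.Dict.empty, List.nil_append]
  -- reduce B's result to the same shape
  rw [PySem.Dict.items_counter]
  have hL : PySem.Set.ofList (paths.flatMap pvDistinctFeats) = st.1.keys := by
    rw [hkeys]
    have := pvOfList_flatMap_ofList paths (fun path => path.map (·.1)) PySem.Set.empty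
    simp only [← pvDistinctFeats_eq] at this
    rw [← PySem.Set.update_nil_left, ← PySem.Set.update_nil_left
      (paths.flatMap fun path => path.map (·.1))]
    exact this
  rw [hL, List.filter_map, List.map_map]
  have hfiltB : st.1.keys.filter
        ((fun p : String × Int => decide (2 * p.2 ≥ (paths.length : Int))) ∘
          (fun k => (k, ((paths.flatMap pvDistinctFeats).count k : Int))))
      = st.1.keys.filter (fun f =>
          decide (2 * ((paths.countP (fun path => path.any (fun p => p.1 == f)) : Int)) ≥ (paths.length : Int))) := by
    apply List.filter_congr
    intro k _
    simp only [Function.comp_apply, pvCount_flatMap_distinct]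
  rw [hfiltB, List.map_map]
  apply List.map_congr_left
  intro k _
  show (k, st.2.getD k PySem.Set.empty) = _
  rw [hval k]
  rfl
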